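-- pv_equiv track=rewrite | github.com/dmytry-b/ServerListGenerator | main.py | do_intervals
-- ===== SOURCE A (Python) =====
-- import ipaddress
--
-- def do_intervals(ip_list):
--     interval_list = []
--     ip = ip_list[0][0]
--     for i in range(len(ip_list)):
--         if i == len(ip_list) - 1:
--             interval_list.append([ip, ip_list[i][0]])
--         else:
--             ip1 = ipaddress.ip_address(ip_list[i][0])
--             ip2 = ipaddress.ip_address(ip_list[i + 1][0])
--             ip1_tmp = ip_list[i][0].split('.')
--             del ip1_tmp[3]
--             subnet_ip1 = ipaddress.ip_network('.'.join(ip1_tmp) + '.0/24')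
--             if (ip1 == ip2 - 1) and (ip2 in subnet_ip1):
--                 continue
--             else:
--                 interval_list.append([ip, ip_list[i][0]])
--                 ip = ip_list[i + 1][0]
--     return interval_list
-- ===== SOURCE B (Python) =====
-- def _ipv4(s):
--     # int(ipaddress.ip_address(s)) for dotted-quad IPv4 strings, None if s is not one
--     parts = s.split('.')
--     if len(parts) != 4:
--         return None
--     v = 0
--     for p in parts:
--         if not p.isdigit() or (len(p) > 1 and p[0] == '0') or int(p) > 255:
--             return None
--         v = v * 256 + int(p)
--     return v
--
--
-- def do_intervals(ip_list):
--     # Build the intervals back-to-front: walk the list in reverse and either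
--     # extend the current first group or open a new one; anything that is not a
--     # dotted-quad IPv4 address is never adjacent to anything.
--     groups = []
--     for row in reversed(ip_list):
--         ip = row[0]
--         if groups:
--             v = _ipv4(ip)
--             w = _ipv4(groups[0][0])
--             if v is not None and w is not None and v + 1 == w and v // 256 == w // 256:
--                 groups[0][0] = ip
--                 continue
--         groups.insert(0, [ip, ip])
--     return groups
-- ===== Notes on version B (the rewrite author's own statement) =====
-- stated objective: simpler
-- what changed: B replaces A's index loop with its carried run-start variable and its split/del/join/ip_network '/24' string surgery by a single reverse pass that either extends the current first interval or opens a new one, deciding adjacency with a hand-rolled dotted-quad parser (None on anything else) and plain integer arithmetic (v+1==w and v//256==w//256).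
import Mathlib
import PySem

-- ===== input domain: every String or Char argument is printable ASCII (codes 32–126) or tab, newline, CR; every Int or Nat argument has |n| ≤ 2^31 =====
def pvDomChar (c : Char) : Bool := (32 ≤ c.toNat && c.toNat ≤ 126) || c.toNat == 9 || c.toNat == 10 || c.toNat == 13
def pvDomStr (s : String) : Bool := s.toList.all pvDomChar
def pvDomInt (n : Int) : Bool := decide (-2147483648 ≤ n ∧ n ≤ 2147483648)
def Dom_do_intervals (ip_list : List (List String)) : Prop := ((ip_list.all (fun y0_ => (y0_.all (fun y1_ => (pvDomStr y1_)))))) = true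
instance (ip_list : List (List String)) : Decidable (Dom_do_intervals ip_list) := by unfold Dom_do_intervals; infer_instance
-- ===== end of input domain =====

-- B rebuilds the intervals back-to-front in one reverse pass (merge into the current first
-- group or open a new one), replacing A's index loop with its carried run-start variable and
-- A's split/del/join/ip_network same-/24 test by an integer //256 comparison (objective: simpler).

-- ===== shared model of the `ipaddress` library (used by the port of A and by Pre_) =====

-- value of one dotted-quad octet string, exactly ipaddress's rule: non-empty, ASCII digits
-- only, no leading zero, value ≤ 255 (a >3-digit string without leading zero is > 255)
def octetVal? (p : List Char) : Option Int :=
  if p = [] then none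
  else if !(p.all Char.isDigit) then none
  else if 1 < p.length && (p.head? == some '0') then none
  else if p.foldl (fun a c => a * 10 + ((c.toNat : Int) - 48)) 0 ≤ 255 then
    some (p.foldl (fun a c => a * 10 + ((c.toNat : Int) - 48)) 0)
  else none

-- int(ipaddress.IPv4Address(s)) for dotted-quad strings; none where that raises ValueError
def ipv4ValC? (cs : List Char) : Option Int :=
  match PySem.Chars.splitOn cs ['.'] with
  | [p0, p1, p2, p3] =>
    match octetVal? p0, octetVal? p1, octetVal? p2, octetVal? p3 with
    | some a, some b, some c, some d => some (((a * 256 + b) * 256 + c) * 256 + d)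
    | _, _, _, _ => none
  | _ => none

-- one IPv6 hextet (ipaddress._parse_hextet): 1-4 hex digits
def hexDigitVal (c : Char) : Nat :=
  if c.isDigit then c.toNat - 48
  else if 'a' ≤ c ∧ c ≤ 'f' then c.toNat - 87
  else c.toNat - 55

def hextet? (p : List Char) : Option Nat :=
  if p = [] then none
  else if 4 < p.length then none
  else if p.all (fun c => c.isDigit || (decide ('a' ≤ c) && decide (c ≤ 'f')) || (decide ('A' ≤ c) && decide (c ≤ 'F'))) then
    some (p.foldl (fun a c => a * 16 + hexDigitVal c) 0)
  else none

def hextetsVal? (ps : List (List Char)) (acc : Nat) : Option Nat :=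
  ps.foldl (fun a p => a.bind (fun n => (hextet? p).map (fun h => n * 65536 + h))) (some acc)

-- int(ipaddress.IPv6Address(s)) without a scope id: hand port of IPv6Address._ip_int_from_string
-- (split on ':', optional embedded dotted quad in the last part, at most one '::', 8 hextets)
def ipv6Val? (cs : List Char) : Option Int :=
  let parts0 := PySem.Chars.splitOn cs [':']
  if parts0.length < 3 then none else
  match (if (parts0.getLastD []).contains '.' then
           (ipv4ValC? (parts0.getLastD [])).map (fun v =>
             parts0.dropLast ++ [Nat.toDigits 16 (v.toNat / 65536), Nat.toDigits 16 (v.toNat % 65536)])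
         else some parts0) with
  | none => none
  | some parts =>
    if 9 < parts.length then none else
    match (List.range parts.length).filter
        (fun i => decide (0 < i) && decide (i < parts.length - 1) && decide (parts.getD i [] = [])) with
    | [] =>
      if parts.length ≠ 8 ∨ parts.headD [] = [] ∨ parts.getLastD [] = [] then none
      else (hextetsVal? parts 0).map (fun n => (n : Int))
    | [i] =>
      let hi := if parts.headD [] = [] then i - 1 else i
      let lo := if parts.getLastD [] = [] then parts.length - i - 2 else parts.length - i - 1
      if parts.headD [] = [] ∧ hi ≠ 0 then none
      else if parts.getLastD [] = [] ∧ lo ≠ 0 then none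
      else if 8 ≤ hi + lo then none
      else
        match hextetsVal? (parts.take hi) 0, hextetsVal? (parts.drop (parts.length - lo)) 0 with
        | some a, some b => some (((a * 65536 ^ (8 - hi) + b : Nat) : Int))
        | _, _ => none
    | _ => none

-- IPv6 with an optional '%scope' suffix (nonempty, no further '%'), as IPv6Address.__init__
def ipv6Full? (cs : List Char) : Option Int :=
  if cs.contains '%' then
    let i := cs.idxOf '%'
    let scope := cs.drop (i + 1)
    if scope = [] ∨ scope.contains '%' then none
    else ipv6Val? (cs.take i)
  else ipv6Val? cs

-- ipaddress.ip_address(s): try IPv4 then IPv6; (isV6, int value), none where it raises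
def ipAddrVal? (s : String) : Option (Bool × Int) :=
  match ipv4ValC? s.toList with
  | some v => some (false, v)
  | none => (ipv6Full? s.toList).map (fun v => (true, v))

-- ===== PORT A =====

-- base address of ipaddress.ip_network(t + '/24') (hand port: parse the address part,
-- strict host-bits-zero check; exact on the strings A builds from IPv4 input inside Pre_)
def net24Base? (t : List Char) : Option Int :=
  match ipv4ValC? t with
  | some b => if b % 256 == 0 then some b else none
  | none => none

-- the loop-body test: (ip1 == ip2 - 1) and (ip2 in subnet_ip1); cross-version equality and
-- membership are False in ipaddress, modelled by the version fields (exact on Pre_)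
def condA (s1 s2 : String) : Bool :=
  let a1 := (ipAddrVal? s1).getD (false, 0)                         -- ip1 = ip_address(ip_list[i][0])
  let a2 := (ipAddrVal? s2).getD (false, 0)                         -- ip2 = ip_address(ip_list[i+1][0])
  let tmp := (PySem.Chars.splitOn s1.toList ['.']).eraseIdx 3       -- ip1_tmp = split('.'); del ip1_tmp[3]
  let net := PySem.Chars.join ['.'] tmp ++ ['.', '0']               -- '.'.join(ip1_tmp) + '.0'  (the '/24' goes to net24Base?)
  let b := (net24Base? net).getD 0
  (a1.1 == a2.1 && a1.2 == a2.2 - 1) &&                             -- ip1 == ip2 - 1 (same version, same value)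
    (a2.1 == false && (decide (b ≤ a2.2) && decide (a2.2 < b + 256)))  -- ip2 in the IPv4 /24 network

-- ip_list[i][0] (defaults outside Pre_, where Python raises IndexError)
def elemA (ip_list : List (List String)) (i : Int) : String :=
  (PySem.List.pyGet? ((PySem.List.pyGet? ip_list i).getD []) 0).getD ""

def stepA (ip_list : List (List String)) (st : List (List String) × String) (i : Int) :
    List (List String) × String :=
  if i == (ip_list.length : Int) - 1 then (st.1 ++ [[st.2, elemA ip_list i]], st.2)
  else if condA (elemA ip_list i) (elemA ip_list (i + 1)) then st
  else (st.1 ++ [[st.2, elemA ip_list i]], elemA ip_list (i + 1))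

def do_intervals (ip_list : List (List String)) : List (List String) :=
  ((PySem.List.pyRange 0 (ip_list.length : Int) 1).foldl (stepA ip_list) ([], elemA ip_list 0)).1

-- ===== PORT B =====

-- B's test: _ipv4 parses a dotted quad or returns None; merge only if both parse,
-- consecutive, and in the same /256 block
def condB (s1 s2 : String) : Bool :=
  match ipv4ValC? s1.toList, ipv4ValC? s2.toList with
  | some v, some w => v + 1 == w && PySem.Int.floordiv v 256 == PySem.Int.floordiv w 256
  | _, _ => false

def stepB (groups : List (List String)) (row : List String) : List (List String) :=
  let ip := (PySem.List.pyGet? row 0).getD ""                       -- row[0]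
  match groups with
  | (a :: g0) :: rest =>
    if condB ip a then (ip :: g0) :: rest                           -- groups[0][0] = ip
    else [ip, ip] :: (a :: g0) :: rest                              -- groups.insert(0, [ip, ip])
  | _ => [ip, ip] :: groups                                         -- groups is [] here

def do_intervals_alt (ip_list : List (List String)) : List (List String) :=
  ip_list.reverse.foldl stepB []

-- ===== PRECONDITION & SPEC =====
-- Pre_ admits nonempty lists of nonempty rows whose first entries ip_address accepts, with all
-- entries before the last restricted to IPv4 dotted quads and no zero-valued address after the
-- first entry. Elsewhere A raises (IndexError on the empty list / empty rows, ValueError on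
-- strings ip_address rejects, AddressValueError computing ip2 - 1 of a zero address, and — for
-- almost all non-IPv4 non-last entries — ValueError/IndexError in its dotted-decimal '/24'
-- surgery), EXCEPT for the rare zero-valued embedded-IPv6 forms that survive that surgery,
-- where A compares and merges IPv6 addresses through an IPv4-style /24 window — an accident of
-- the string surgery on input outside the function's IPv4 purpose, kept outside Pre_ (see the
-- claim's cite; B treats such entries as plain unmergeable strings).
-- (The zero-address clause only removes a Python raise; the equivalence proof never needs it.)
def Pre_do_intervals (ip_list : List (List String)) : Prop :=
  ip_list ≠ [] ∧ (∀ row ∈ ip_list, row ≠ []) ∧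
  (2 ≤ ip_list.length →
    (∀ row ∈ ip_list.dropLast, (ipv4ValC? (row.headD "").toList).isSome = true) ∧
    (ipAddrVal? ((ip_list.getLastD []).headD "")).isSome = true ∧
    (∀ row ∈ ip_list.tail, (ipAddrVal? (row.headD "")).map Prod.snd ≠ some 0))
instance (ip_list : List (List String)) : Decidable (Pre_do_intervals ip_list) := by
  unfold Pre_do_intervals; infer_instance

def pvWitness_do_intervals : List (List String) := [["1.2.3.4"], ["1.2.3.5"], ["9.0.0.1"]]

def Spec_do_intervals (ip_list : List (List String)) (out : List (List String)) : Prop := out = do_intervals_alt ip_list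
instance (ip_list : List (List String)) (out : List (List String)) : Decidable (Spec_do_intervals ip_list out) := by unfold Spec_do_intervals; infer_instance

-- ===== CLAIM (what is proved, stated in full; the proofs are below) =====
def Claim_equal_do_intervals : Prop := ∀ (ip_list : List (List String)), Dom_do_intervals ip_list → Pre_do_intervals ip_list → Spec_do_intervals ip_list (do_intervals ip_list)

-- ===== LEMMAS AND PROOFS =====

-- A's loop as structural recursion: ip is the pending run start
def goA : String → List String → List (List String)
  | _, [] => []
  | ip, [x] => [[ip, x]]
  | ip, x :: y :: rest => if condA x y then goA ip (y :: rest) else [ip, x] :: goA y (y :: rest)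

-- B's foldr step on the first strings
def mergeB (ip : String) (groups : List (List String)) : List (List String) :=
  match groups with
  | (a :: g0) :: rest =>
    if condB ip a then (ip :: g0) :: rest else [ip, ip] :: (a :: g0) :: rest
  | _ => [ip, ip] :: groups

def setStart (ip : String) : List (List String) → List (List String)
  | (_ :: g0) :: rest => (ip :: g0) :: rest
  | g => g

def firsts (ip_list : List (List String)) : List String :=
  ip_list.map (fun row => row.headD "")

-- ---- facts about the parser ----

theorem ipAddrVal?_v4 (s : String) (v : Int) (h : ipv4ValC? s.toList = some v) :
    ipAddrVal? s = some (false, v) := by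
  simp [ipAddrVal?, h]

theorem ipAddrVal?_v6_none (s : String) (p : Bool × Int)
    (h : ipAddrVal? s = some p) (hp : p.1 = true) : ipv4ValC? s.toList = none := by
  unfold ipAddrVal? at h
  cases hv : ipv4ValC? s.toList with
  | none => rfl
  | some v =>
    rw [hv] at h
    injection h with h
    rw [← h] at hp
    simp at hp

theorem digit_toNat {c : Char} (hc : c.isDigit = true) : 48 ≤ c.toNat ∧ c.toNat ≤ 57 := by
  simp [Char.isDigit, UInt32.le_iff_toNat_le] at hc
  exact hc

theorem fold_nonneg (p : List Char) (hd : ∀ c ∈ p, c.isDigit = true) :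
    ∀ acc : Int, 0 ≤ acc → 0 ≤ p.foldl (fun a c => a * 10 + ((c.toNat : Int) - 48)) acc := by
  induction p with
  | nil => intro acc h; simpa using h
  | cons c rest ih =>
    intro acc h
    simp only [List.foldl_cons]
    refine ih (fun x hx => hd x (by simp [hx])) _ ?_
    have h1 := digit_toNat (hd c (by simp))
    have h2 : (48 : Int) ≤ (c.toNat : Int) := by exact_mod_cast h1.1
    nlinarith

theorem octetVal?_facts (p : List Char) (a : Int) (h : octetVal? p = some a) :
    (∀ c ∈ p, c ≠ '.') ∧ 0 ≤ a ∧ a ≤ 255 := by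
  unfold octetVal? at h
  split_ifs at h with h1 h2 h3 h4
  injection h with h; subst h
  have hd : ∀ c ∈ p, c.isDigit = true := by
    intro c hc
    by_contra hcd
    simp at h2
    exact hcd (h2 c hc)
  refine ⟨fun c hc hdot => ?_, fold_nonneg p hd 0 le_rfl, h4⟩
  have := hd c hc; subst hdot; simp at this

theorem ipv4_inv (cs : List Char) (v : Int) (h : ipv4ValC? cs = some v) :
    ∃ p0 p1 p2 p3 a0 a1 a2 a3,
      PySem.Chars.splitOn cs ['.'] = [p0, p1, p2, p3] ∧
      octetVal? p0 = some a0 ∧ octetVal? p1 = some a1 ∧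
      octetVal? p2 = some a2 ∧ octetVal? p3 = some a3 ∧
      v = ((a0 * 256 + a1) * 256 + a2) * 256 + a3 := by
  unfold ipv4ValC? at h
  split at h
  · rename_i p0 p1 p2 p3 heq
    split at h
    · rename_i a0 a1 a2 a3 e0 e1 e2 e3
      exact ⟨p0, p1, p2, p3, a0, a1, a2, a3, heq, e0, e1, e2, e3, (Option.some_inj.mp h).symm⟩
    · exact absurd h (by simp)
  · exact absurd h (by simp)

-- ---- splitOn over dot-free pieces (by induction on the fuel recursion of splitOn.go) ----

theorem splitOn_go_no_dot (l : List Char) :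
    ∀ (fuel : Nat) (cur : List Char) (accs : List (List Char)),
      (∀ c ∈ l, c ≠ '.') → l.length ≤ fuel →
      PySem.Chars.splitOn.go ['.'] fuel l cur accs = ((cur.reverse ++ l) :: accs).reverse := by
  induction l with
  | nil =>
    intro fuel cur accs _ _
    cases fuel <;> simp [PySem.Chars.splitOn.go]
  | cons c rest ih =>
    intro fuel cur accs h hlen
    cases fuel with
    | zero => simp at hlen
    | succ f =>
      have hc : c ≠ '.' := h c (by simp)
      rw [PySem.Chars.splitOn.go]
      have hp : List.isPrefixOf ['.'] (c :: rest) = false := by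
        simp [List.isPrefixOf]; exact fun hh => (hc hh.symm).elim
      rw [hp]
      simp only [Bool.false_eq_true, if_false]
      rw [ih f (c :: cur) accs (fun x hx => h x (by simp [hx])) (by simpa using hlen)]
      simp

theorem splitOn_go_piece (p : List Char) :
    ∀ (fuel : Nat) (t cur : List Char) (accs : List (List Char)),
      (∀ c ∈ p, c ≠ '.') → p.length + 1 ≤ fuel →
      PySem.Chars.splitOn.go ['.'] fuel (p ++ '.' :: t) cur accs =
        PySem.Chars.splitOn.go ['.'] (fuel - (p.length + 1)) t [] ((cur.reverse ++ p) :: accs) := by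
  induction p with
  | nil =>
    intro fuel t cur accs _ hlen
    cases fuel with
    | zero => omega
    | succ f =>
      simp only [List.nil_append]
      rw [PySem.Chars.splitOn.go]
      have hp : List.isPrefixOf ['.'] ('.' :: t) = true := by simp [List.isPrefixOf]
      rw [hp]
      simp
  | cons c rest ih =>
    intro fuel t cur accs h hlen
    cases fuel with
    | zero => omega
    | succ f =>
      have hc : c ≠ '.' := h c (by simp)
      simp only [List.cons_append]
      rw [PySem.Chars.splitOn.go]
      have hp : List.isPrefixOf ['.'] (c :: (rest ++ '.' :: t)) = false := by
        simp [List.isPrefixOf]; exact fun hh => (hc hh.symm).elim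
      rw [hp]
      simp only [Bool.false_eq_true, if_false]
      rw [ih f t (c :: cur) accs (fun x hx => h x (by simp [hx])) (by simp at hlen ⊢; omega)]
      have e2 : (c :: cur).reverse ++ rest = cur.reverse ++ c :: rest := by simp
      have e1 : f + 1 - ((c :: rest).length + 1) = f - (rest.length + 1) := by simp
      rw [e2, e1]

theorem splitOn_parts (p0 p1 p2 q : List Char)
    (h0 : ∀ c ∈ p0, c ≠ '.') (h1 : ∀ c ∈ p1, c ≠ '.')
    (h2 : ∀ c ∈ p2, c ≠ '.') (hq : ∀ c ∈ q, c ≠ '.') :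
    PySem.Chars.splitOn (p0 ++ '.' :: (p1 ++ '.' :: (p2 ++ '.' :: q))) ['.'] = [p0, p1, p2, q] := by
  unfold PySem.Chars.splitOn
  rw [splitOn_go_piece p0 _ _ _ _ h0 (by simp only [List.length_append, List.length_cons]; omega)]
  rw [splitOn_go_piece p1 _ _ _ _ h1 (by simp only [List.length_append, List.length_cons]; omega)]
  rw [splitOn_go_piece p2 _ _ _ _ h2 (by simp only [List.length_append, List.length_cons]; omega)]
  rw [splitOn_go_no_dot q _ _ _ hq (by simp only [List.length_append, List.length_cons]; omega)]
  simp

-- ---- inside Pre_, A's test and B's test agree ----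

theorem cond_eq (s1 s2 : String)
    (h1 : (ipv4ValC? s1.toList).isSome = true) (h2 : (ipAddrVal? s2).isSome = true) :
    condA s1 s2 = condB s1 s2 := by
  obtain ⟨v1, hv1⟩ := Option.isSome_iff_exists.mp h1
  obtain ⟨p2v, hp2⟩ := Option.isSome_iff_exists.mp h2
  obtain ⟨p0, p1, p2, p3, a0, a1, a2, a3, hsp, e0, e1, e2, e3, hv⟩ := ipv4_inv _ _ hv1
  have d0 := octetVal?_facts _ _ e0
  have d1 := octetVal?_facts _ _ e1
  have d2 := octetVal?_facts _ _ e2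
  have d3 := octetVal?_facts _ _ e3
  have hjoin : PySem.Chars.join ['.'] ((PySem.Chars.splitOn s1.toList ['.']).eraseIdx 3) ++ ['.', '0']
      = p0 ++ '.' :: (p1 ++ '.' :: (p2 ++ '.' :: ['0'])) := by
    rw [hsp]
    simp [PySem.Chars.join, List.intercalate]
  have hnet : ipv4ValC? (PySem.Chars.join ['.'] ((PySem.Chars.splitOn s1.toList ['.']).eraseIdx 3) ++ ['.', '0'])
      = some (((a0 * 256 + a1) * 256 + a2) * 256) := by
    have o0 : octetVal? ['0'] = some 0 := by
      simp [octetVal?]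
    have hd : ∀ c ∈ (['0'] : List Char), c ≠ '.' := by
      intro c hc; simp at hc; subst hc; decide
    rw [hjoin]
    unfold ipv4ValC?
    rw [splitOn_parts p0 p1 p2 ['0'] d0.1 d1.1 d2.1 hd]
    simp [e0, e1, e2, o0]
  have hbase : net24Base? (PySem.Chars.join ['.'] ((PySem.Chars.splitOn s1.toList ['.']).eraseIdx 3) ++ ['.', '0'])
      = some (((a0 * 256 + a1) * 256 + a2) * 256) := by
    unfold net24Base?
    rw [hnet]
    simp [Int.mul_emod_left]
  have hA1 : ipAddrVal? s1 = some (false, v1) := ipAddrVal?_v4 s1 v1 hv1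
  cases hver : p2v.1 with
  | true =>
    -- s2 is an IPv6 address: cross-version comparison and membership are both False,
    -- and B's IPv4 parse of s2 fails
    have hn2 : ipv4ValC? s2.toList = none := ipAddrVal?_v6_none s2 p2v hp2 hver
    unfold condA condB
    simp only [hA1, hp2, hv1, hn2, Option.getD_some]
    simp [hver]
  | false =>
    have hv2 : ipv4ValC? s2.toList = some p2v.2 := by
      unfold ipAddrVal? at hp2
      cases hw : ipv4ValC? s2.toList with
      | some w => rw [hw] at hp2; injection hp2 with hp2; rw [← hp2]
      | none =>
        rw [hw] at hp2
        cases hz : ipv6Full? s2.toList with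
        | none => rw [hz] at hp2; simp at hp2
        | some z =>
          rw [hz] at hp2; simp at hp2
          rw [← hp2] at hver; simp at hver
    obtain ⟨w0, w1, w2, w3, b0, b1, b2, b3, hsp2, f0, f1, f2, f3, hw⟩ := ipv4_inv _ _ hv2
    have g0 := octetVal?_facts _ _ f0
    have g1 := octetVal?_facts _ _ f1
    have g2 := octetVal?_facts _ _ f2
    have g3 := octetVal?_facts _ _ f3
    rw [Bool.eq_iff_iff]
    unfold condA condB
    simp only [hA1, hp2, hv1, hv2, hbase, Option.getD_some]
    simp only [hver, beq_self_eq_true, Bool.true_and, Bool.and_eq_true,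
      beq_iff_eq, decide_eq_true_eq,
      PySem.Int.floordiv_eq_ediv_of_pos (by norm_num : (0:Int) < 256)]
    obtain ⟨-, ha3, ha3u⟩ := d3
    obtain ⟨-, hb0, -⟩ := g0
    obtain ⟨-, hb1, -⟩ := g1
    obtain ⟨-, hb2, -⟩ := g2
    obtain ⟨-, hb3, -⟩ := g3
    subst hv
    rw [hw]
    constructor
    · rintro ⟨hc, hm1, hm2⟩
      exact ⟨by omega, by omega⟩
    · rintro ⟨hc, hdiv⟩
      exact ⟨by omega, by omega, by omega⟩

-- ---- A's indexed fold equals goA ----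

theorem elemA_eq (l : List (List String)) (k : Nat) :
    elemA l (k : Int) = (firsts l).getD k "" := by
  unfold elemA firsts
  rw [PySem.List.pyGet?_natCast]
  cases hk : l[k]? with
  | none =>
    have hlen : k ≥ l.length := by simpa [List.getElem?_eq_none_iff] using hk
    simp [List.getD, hlen, PySem.List.pyGet?]
  | some row =>
    simp only [Option.getD_some]
    have h0 : PySem.List.pyGet? row (0 : Int) = row[0]? := by
      simpa using PySem.List.pyGet?_natCast row 0
    rw [h0]
    simp [List.getD, List.getElem?_map, hk]
    cases row <;> simp

theorem A_loop (l : List (List String)) :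
    ∀ (n k : Nat), l.length - k = n → k < l.length → ∀ (acc : List (List String)) (ip : String),
      ((PySem.List.pyRange (k : Int) (l.length : Int) 1).foldl (stepA l) (acc, ip)).1 =
        acc ++ goA ip ((firsts l).drop k) := by
  intro n
  induction n with
  | zero => intro k hnk hk; omega
  | succ m ih =>
    intro k hnk hk acc ip
    have hfl : (firsts l).length = l.length := by simp [firsts]
    have hklt : (k : Int) < (l.length : Int) := by exact_mod_cast hk
    rw [PySem.List.pyRange_one_cons hklt]
    simp only [List.foldl_cons]
    by_cases hlast : k = l.length - 1
    · have hbeq : ((k : Int) == (l.length : Int) - 1) = true := by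
        simp only [beq_iff_eq]; omega
      have hstep : stepA l (acc, ip) (k : Int) = (acc ++ [[ip, elemA l (k : Int)]], ip) := by
        unfold stepA
        rw [hbeq]
        simp
      rw [hstep]
      rw [PySem.List.pyRange_one_eq_nil (by omega : ((l.length : Int)) ≤ (k : Int) + 1)]
      simp only [List.foldl_nil]
      have hdrop : (firsts l).drop k = [(firsts l).getD k ""] := by
        rw [List.drop_eq_getElem_cons (by omega), List.drop_eq_nil_of_le (by omega)]
        rw [List.getD_eq_getElem _ _ (by omega)]
      rw [hdrop, elemA_eq]
      simp [goA]
    · have hbeq : ((k : Int) == (l.length : Int) - 1) = false := by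
        simp only [beq_eq_false_iff_ne, ne_eq]
        omega
      have hcast : ((k : Int) + 1) = (((k + 1 : Nat)) : Int) := by push_cast; ring
      have hdropk : (firsts l).drop k = (firsts l).getD k "" :: (firsts l).drop (k + 1) := by
        rw [List.drop_eq_getElem_cons (by omega), List.getD_eq_getElem _ _ (by omega)]
      have hdropk1 : (firsts l).drop (k + 1) =
          (firsts l).getD (k + 1) "" :: (firsts l).drop (k + 2) := by
        rw [List.drop_eq_getElem_cons (by omega), List.getD_eq_getElem _ _ (by omega)]
      have hy : elemA l ((k : Int) + 1) = (firsts l).getD (k + 1) "" := by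
        rw [hcast]; exact elemA_eq l (k + 1)
      have hgo : goA ip ((firsts l).drop k) =
          if condA ((firsts l).getD k "") ((firsts l).getD (k + 1) "") then
            goA ip ((firsts l).drop (k + 1))
          else [ip, (firsts l).getD k ""] :: goA ((firsts l).getD (k + 1) "") ((firsts l).drop (k + 1)) := by
        rw [hdropk, hdropk1]
        rw [goA, ← hdropk1]
      by_cases hc : condA (elemA l (k : Int)) (elemA l ((k : Int) + 1)) = true
      · have hstep : stepA l (acc, ip) (k : Int) = (acc, ip) := by
          unfold stepA
          rw [hbeq, hc]
          simp
        rw [hstep]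
        rw [hcast, ih (k + 1) (by omega) (by omega) acc ip]
        rw [elemA_eq, hy] at hc
        rw [hgo, if_pos hc]
      · have hstep : stepA l (acc, ip) (k : Int) =
            (acc ++ [[ip, elemA l (k : Int)]], elemA l ((k : Int) + 1)) := by
          unfold stepA
          rw [hbeq]
          simp only [Bool.false_eq_true, if_false]
          rw [if_neg hc]
        rw [hcast] at hstep
        rw [hstep]
        rw [hcast]
        rw [ih (k + 1) (by omega) (by omega) (acc ++ [[ip, elemA l (k : Int)]]) (elemA l (((k + 1 : Nat)) : Int))]
        rw [hy] at hc
        rw [elemA_eq l k] at hc ⊢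
        rw [elemA_eq l (k + 1)]
        rw [hgo, if_neg hc]
        simp

-- ---- B's fold equals foldr mergeB over the first strings ----

theorem stepB_eq (g : List (List String)) (row : List String) :
    stepB g row = mergeB (row.headD "") g := by
  have h0 : (PySem.List.pyGet? row (0 : Int)).getD "" = row.headD "" := by
    have : PySem.List.pyGet? row (0 : Int) = row[0]? := by
      simpa using PySem.List.pyGet?_natCast row 0
    rw [this]
    cases row <;> simp
  unfold stepB mergeB
  rw [h0]

theorem mergeB_cons (ip a : String) (g0 : List String) (rest : List (List String)) :
    mergeB ip ((a :: g0) :: rest) =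
      if condB ip a then (ip :: g0) :: rest else [ip, ip] :: (a :: g0) :: rest := rfl

theorem B_foldr_aux (l : List (List String)) :
    List.foldr (fun row g => stepB g row) [] l = List.foldr mergeB [] (firsts l) := by
  induction l with
  | nil => rfl
  | cons row t ih =>
    simp only [List.foldr_cons, firsts, List.map_cons]
    rw [stepB_eq, ih]
    rfl

theorem B_foldr (l : List (List String)) :
    do_intervals_alt l = List.foldr mergeB [] (firsts l) := by
  unfold do_intervals_alt
  rw [List.foldl_reverse]
  exact B_foldr_aux l

theorem mergeB_shape (x : String) (t : List String) :
    ∃ g0 rest, List.foldr mergeB [] (x :: t) = (x :: g0) :: rest := by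
  induction t generalizing x with
  | nil => exact ⟨[x], [], rfl⟩
  | cons y t' ih =>
    obtain ⟨g0, rest, hy⟩ := ih y
    simp only [List.foldr_cons] at hy ⊢
    rw [hy, mergeB_cons]
    by_cases hc : condB x y = true
    · rw [if_pos hc]; exact ⟨g0, rest, rfl⟩
    · rw [if_neg hc]; exact ⟨[x], (y :: g0) :: rest, rfl⟩

theorem goA_eq_mergeB (t : List String) :
    ∀ (x ip : String),
      (∀ s ∈ (x :: t).dropLast, (ipv4ValC? s.toList).isSome = true) →
      (∀ s ∈ x :: t, (ipAddrVal? s).isSome = true) →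
      goA ip (x :: t) = setStart ip (List.foldr mergeB [] (x :: t)) := by
  induction t with
  | nil => intro x ip _ _; simp [goA, mergeB, setStart]
  | cons y t' ih =>
    intro x ip h4 hall
    obtain ⟨g0, rest, hy⟩ := mergeB_shape y t'
    have hvx : (ipv4ValC? x.toList).isSome = true := h4 x (by simp)
    have hvy : (ipAddrVal? y).isSome = true := hall y (by simp)
    have hcond := cond_eq x y hvx hvy
    have h4' : ∀ s ∈ (y :: t').dropLast, (ipv4ValC? s.toList).isSome = true := by
      intro s hs
      exact h4 s (by simpa using Or.inr hs)
    have hall' : ∀ s ∈ y :: t', (ipAddrVal? s).isSome = true := by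
      intro s hs
      exact hall s (by simp at hs ⊢; tauto)
    simp only [List.foldr_cons] at hy ⊢
    rw [hy]
    by_cases hc : condB x y = true
    · rw [goA, hcond, if_pos hc]
      have := ih y ip h4' hall'
      simp only [List.foldr_cons] at this
      rw [this, hy, mergeB_cons, if_pos hc]
      rfl
    · rw [goA, hcond, if_neg hc]
      have := ih y y h4' hall'
      simp only [List.foldr_cons] at this
      rw [this, hy, mergeB_cons, if_neg hc]
      rfl

-- ---- glue ----

theorem A_all (l : List (List String)) (hne : l ≠ []) :
    do_intervals l = goA ((firsts l).getD 0 "") (firsts l) := by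
  unfold do_intervals
  have hlen : 0 < l.length := List.length_pos_iff.mpr hne
  have h0 : ((0 : Int)) = (((0 : Nat)) : Int) := by norm_num
  rw [h0, A_loop l l.length 0 (by omega) hlen [] (elemA l ((0 : Nat) : Int))]
  rw [elemA_eq l 0]
  simp

theorem firsts_dropLast (l : List (List String)) :
    (firsts l).dropLast = firsts l.dropLast := by
  induction l with
  | nil => rfl
  | cons a t ih =>
    cases t with
    | nil => rfl
    | cons b t' => simp [firsts]

theorem firsts_getLast (l : List (List String)) (hne : l ≠ []) :
    (firsts l).getLastD "" = (l.getLastD []).headD "" := by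
  induction l with
  | nil => exact absurd rfl hne
  | cons a t ih =>
    cases t with
    | nil => rfl
    | cons b t' => simpa [firsts] using ih (by simp)

-- ===== VERDICT (by name: the statement is the Claim_ definition above) =====
theorem do_intervals_spec : Claim_equal_do_intervals := by
  intro l _ hpre
  unfold Spec_do_intervals
  obtain ⟨hne, hrows, himp⟩ := hpre
  rw [A_all l hne, B_foldr l]
  cases hfl : firsts l with
  | nil =>
    exact absurd (congrArg List.length hfl) (by simp [firsts, List.length_eq_zero_iff, hne])
  | cons x xs =>
    simp only [List.getD_cons_zero]
    cases xs with
    | nil => rfl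
    | cons y xs' =>
      have hlen2 : 2 ≤ l.length := by
        have := congrArg List.length hfl
        simp [firsts] at this
        omega
      obtain ⟨h4, hL, -⟩ := himp hlen2
      have hfne : firsts l ≠ [] := by rw [hfl]; simp
      have hv4 : ∀ s ∈ (x :: y :: xs').dropLast, (ipv4ValC? s.toList).isSome = true := by
        intro s hs
        rw [← hfl, firsts_dropLast] at hs
        obtain ⟨row, hrow, hh⟩ := List.mem_map.mp hs
        exact hh ▸ h4 row hrow
      have hlasteq : (firsts l).getLast hfne = (l.getLastD []).headD "" := by
        rw [← firsts_getLast l hne, List.getLastD_eq_getLast?, List.getLast?_eq_some_getLast hfne]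
        rfl
      have hall : ∀ s ∈ (x :: y :: xs'), (ipAddrVal? s).isSome = true := by
        intro s hs
        rw [← hfl] at hs
        rw [← List.dropLast_append_getLast hfne] at hs
        rcases List.mem_append.mp hs with hs | hs
        · rw [firsts_dropLast] at hs
          obtain ⟨row, hrow, hh⟩ := List.mem_map.mp hs
          have := h4 row hrow
          obtain ⟨v, hv⟩ := Option.isSome_iff_exists.mp (hh ▸ this)
          rw [ipAddrVal?_v4 s v hv]
          rfl
        · have : s = (firsts l).getLast hfne := by simpa using hs
          rw [this, hlasteq]
          exact hL
      rw [goA_eq_mergeB (y :: xs') x x hv4 hall]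
      obtain ⟨g0, rest, hsh⟩ := mergeB_shape x (y :: xs')
      rw [hsh]
      rfl
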